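-- pv_equiv track=rewrite | github.com/jrsdav/adventofcode | 2023/01/p1/solution.py | extract_callibration_value
-- ===== SOURCE A (Python) =====
-- def extract_callibration_value(input):
--
-- 	results = []
--
-- 	for s in input:
-- 		numbers = [char for char in s if char.isdigit()]
--
-- 		if numbers:
-- 			first = numbers[0]
-- 			last = numbers[-1]
--
-- 			results.append(int(first + last))
--
-- 	return results
-- ===== SOURCE B (Python) =====
-- def extract_callibration_value(input):
--     results = []
--     for s in input:
--         first = None
--         for ch in s:
--             if ch.isdigit():
--                 first = ch
--                 break
--         if first is None:
--             continue
--         last = None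
--         for ch in reversed(s):
--             if ch.isdigit():
--                 last = ch
--                 break
--         results.append(int(first + last))
--     return results
-- ===== Notes on version B (the rewrite author's own statement) =====
-- stated objective: alternative
-- what changed: B replaces A's per-string list of all digit characters with two early-terminating scans (forward for the first digit, over the reversed string for the last), keeping no digit list.
import Mathlib
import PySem

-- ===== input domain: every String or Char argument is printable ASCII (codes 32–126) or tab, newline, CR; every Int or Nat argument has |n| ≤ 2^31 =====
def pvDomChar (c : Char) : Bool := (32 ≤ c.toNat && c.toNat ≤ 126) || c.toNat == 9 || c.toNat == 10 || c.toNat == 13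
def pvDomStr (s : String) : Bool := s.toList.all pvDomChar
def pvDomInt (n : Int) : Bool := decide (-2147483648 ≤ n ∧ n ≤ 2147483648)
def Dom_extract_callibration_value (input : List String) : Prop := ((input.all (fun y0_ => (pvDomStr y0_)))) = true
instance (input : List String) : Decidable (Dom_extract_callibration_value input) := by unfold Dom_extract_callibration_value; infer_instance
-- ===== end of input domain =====

-- B scans each string twice with early-terminating passes (forward / reversed) instead of
-- building A's list of all digit characters; equivalence of the return values is proved below.

-- ===== PORT A =====
-- numbers = [char for char in s if char.isdigit()]; if numbers: append int(numbers[0] + numbers[-1])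
-- (the .getD defaults are never reached: the branch guarantees numbers is nonempty and both chars are digits)
def extract_callibration_value (input : List String) : List Int :=
  input.foldl (fun results s =>
    let numbers := s.toList.filter (fun c => PySem.Chars.isdigit c)
    if numbers.isEmpty then results
    else
      let first := (PySem.List.pyGet? numbers 0).getD ' '
      let last := (PySem.List.pyGet? numbers (-1)).getD ' '
      results ++ [(PySem.Int.ofChars? [first, last]).getD 0]) []

-- ===== PORT B =====
-- the early-break 'for ch in s: if ch.isdigit(): first = ch; break' loop
def pvFirstDigit : List Char → Option Char
  | [] => none
  | c :: cs => if PySem.Chars.isdigit c then some c else pvFirstDigit cs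

def extract_callibration_value_alt (input : List String) : List Int :=
  input.foldl (fun results s =>
    match pvFirstDigit s.toList with
    | none => results
    | some first =>
      match pvFirstDigit s.toList.reverse with
      | none => results
      | some last => results ++ [(PySem.Int.ofChars? [first, last]).getD 0]) []

-- ===== PRECONDITION & SPEC =====
def Spec_extract_callibration_value (input : List String) (out : List Int) : Prop := out = extract_callibration_value_alt input
instance (input : List String) (out : List Int) : Decidable (Spec_extract_callibration_value input out) := by unfold Spec_extract_callibration_value; infer_instance

-- ===== CLAIM (what is proved, stated in full; the proofs are below) =====
def Claim_equal_extract_callibration_value : Prop := ∀ (input : List String), Dom_extract_callibration_value input → Spec_extract_callibration_value input (extract_callibration_value input)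

-- ===== LEMMAS AND PROOFS =====

theorem pvFirstDigit_eq_head?_filter (cs : List Char) :
    pvFirstDigit cs = (cs.filter (fun c => PySem.Chars.isdigit c)).head? := by
  induction cs with
  | nil => rfl
  | cons c cs ih =>
    simp only [pvFirstDigit, List.filter_cons]
    split_ifs with h <;> simp [ih]

theorem pvFirstDigit_reverse_eq_getLast?_filter (cs : List Char) :
    pvFirstDigit cs.reverse = (cs.filter (fun c => PySem.Chars.isdigit c)).getLast? := by
  rw [pvFirstDigit_eq_head?_filter]
  simp [List.filter_reverse, List.head?_reverse]

theorem pvStep_eq (results : List Int) (s : String) :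
    (let numbers := s.toList.filter (fun c => PySem.Chars.isdigit c)
     if numbers.isEmpty then results
     else
       let first := (PySem.List.pyGet? numbers 0).getD ' '
       let last := (PySem.List.pyGet? numbers (-1)).getD ' '
       results ++ [(PySem.Int.ofChars? [first, last]).getD 0]) =
    (match pvFirstDigit s.toList with
     | none => results
     | some first =>
       match pvFirstDigit s.toList.reverse with
       | none => results
       | some last => results ++ [(PySem.Int.ofChars? [first, last]).getD 0]) := by
  rw [pvFirstDigit_eq_head?_filter, pvFirstDigit_reverse_eq_getLast?_filter]
  cases h : s.toList.filter (fun c => PySem.Chars.isdigit c) with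
  | nil => simp
  | cons a rest =>
    have hne : (a :: rest) ≠ ([] : List Char) := by simp
    obtain ⟨l, hl⟩ := List.getLast?_isSome.2 hne |> Option.isSome_iff_exists.1
    simp [PySem.List.pyGet?_neg_one, hl]

theorem pvFoldl_eq (input : List String) (acc : List Int) :
    input.foldl (fun results s =>
      let numbers := s.toList.filter (fun c => PySem.Chars.isdigit c)
      if numbers.isEmpty then results
      else
        let first := (PySem.List.pyGet? numbers 0).getD ' '
        let last := (PySem.List.pyGet? numbers (-1)).getD ' '
        results ++ [(PySem.Int.ofChars? [first, last]).getD 0]) acc =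
    input.foldl (fun results s =>
      match pvFirstDigit s.toList with
      | none => results
      | some first =>
        match pvFirstDigit s.toList.reverse with
        | none => results
        | some last => results ++ [(PySem.Int.ofChars? [first, last]).getD 0]) acc := by
  induction input generalizing acc with
  | nil => rfl
  | cons s rest ih =>
    simp only [List.foldl_cons]
    rw [pvStep_eq]
    exact ih _

-- ===== VERDICT (by name: the statement is the Claim_ definition above) =====
theorem extract_callibration_value_spec : Claim_equal_extract_callibration_value := by
  intro input _
  unfold Spec_extract_callibration_value extract_callibration_value extract_callibration_value_alt
  exact pvFoldl_eq input []
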